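-- pv_equiv track=rewrite | github.com/HYSAcademy/Python-Course-2026-Team3 | rag-service/app/services/context_processor.py | _reorder_for_lost_in_the_middle
-- ===== SOURCE A (Python) =====
-- def _reorder_for_lost_in_the_middle(chunks: list[str]) -> list[str]:
--     """
--     The most important data — at the beginning and end of the list.
--     """
--     if len(chunks) <= 2:
--         return chunks
--
--     reordered = [None] * len(chunks)
--     start_idx, end_idx = 0, len(chunks) - 1
--
--     for i, chunk in enumerate(chunks):
--         if i % 2 == 0:
--             reordered[start_idx] = chunk
--             start_idx += 1
--         else:
--             reordered[end_idx] = chunk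
--             end_idx -= 1
--     return reordered
-- ===== SOURCE B (Python) =====
-- def _reorder_for_lost_in_the_middle(chunks: list[str]) -> list[str]:
--     if len(chunks) <= 2:
--         return chunks
--     return chunks[0::2] + chunks[1::2][::-1]
-- ===== Notes on version B (the rewrite author's own statement) =====
-- stated objective: simpler
-- what changed: A's two-pointer in-place fill of a preallocated list over enumerate is replaced by concatenating two stride slices: even-indexed chunks in order plus odd-indexed chunks reversed.
import Mathlib
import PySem

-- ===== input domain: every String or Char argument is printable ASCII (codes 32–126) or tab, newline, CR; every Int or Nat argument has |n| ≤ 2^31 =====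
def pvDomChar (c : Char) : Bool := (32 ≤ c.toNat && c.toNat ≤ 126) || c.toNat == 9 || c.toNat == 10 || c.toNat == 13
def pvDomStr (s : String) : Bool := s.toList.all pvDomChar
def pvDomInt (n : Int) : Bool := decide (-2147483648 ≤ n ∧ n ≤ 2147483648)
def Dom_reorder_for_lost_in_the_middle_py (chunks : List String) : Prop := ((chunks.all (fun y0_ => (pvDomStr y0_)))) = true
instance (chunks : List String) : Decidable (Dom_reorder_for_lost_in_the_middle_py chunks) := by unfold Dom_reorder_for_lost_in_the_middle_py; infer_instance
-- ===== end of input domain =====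

-- B replaces A's two-pointer in-place fill with two stride slices concatenated (simpler); neither version mutates its argument.

-- ===== PORT A =====
-- loop body of A's 'for i, chunk in enumerate(chunks)': state (reordered, start_idx, end_idx)
def pvStepA (st : List (Option String) × Int × Int) (p : Int × String) :
    List (Option String) × Int × Int :=
  match st, p with
  | (r, s, e), (i, c) =>
    if PySem.Int.mod i 2 = 0 then (PySem.List.pySetD r s (some c), s + 1, e)
    else (PySem.List.pySetD r e (some c), s, e - 1)

def reorder_for_lost_in_the_middle_py (chunks : List String) : List String :=
  if chunks.length ≤ 2 then chunks
  else
    let fin := (PySem.List.enumerate chunks 0).foldl pvStepA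
      (List.replicate chunks.length none, 0, (chunks.length : Int) - 1)
    -- Python's 'reordered' holds only str values at this point (every slot was filled); extract them
    fin.1.reduceOption

-- ===== PORT B =====
-- chunks[0::2] and chunks[1::2] are PySem.List.slice? with step 2, [::-1] is slice? with step -1;
-- the literal steps are never 0, so .getD [] only peels the always-some Option
def reorder_for_lost_in_the_middle_py_alt (chunks : List String) : List String :=
  if chunks.length ≤ 2 then chunks
  else
    ((PySem.List.slice? chunks (some 0) none 2).getD []) ++
      ((PySem.List.slice? ((PySem.List.slice? chunks (some 1) none 2).getD []) none none (-1)).getD [])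

-- ===== PRECONDITION & SPEC =====
def Spec_reorder_for_lost_in_the_middle_py (chunks : List String) (out : List String) : Prop := out = reorder_for_lost_in_the_middle_py_alt chunks
instance (chunks : List String) (out : List String) : Decidable (Spec_reorder_for_lost_in_the_middle_py chunks out) := by unfold Spec_reorder_for_lost_in_the_middle_py; infer_instance

-- ===== CLAIM (what is proved, stated in full; the proofs are below) =====
def Claim_equal_reorder_for_lost_in_the_middle_py : Prop := ∀ (chunks : List String), Dom_reorder_for_lost_in_the_middle_py chunks → Spec_reorder_for_lost_in_the_middle_py chunks (reorder_for_lost_in_the_middle_py chunks)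

-- ===== LEMMAS AND PROOFS =====

-- every second element of a list, starting with the first (what xs[0::2] selects)
def pvEv2 {α : Type} : List α → List α
  | [] => []
  | [a] => [a]
  | a :: _ :: t => a :: pvEv2 t

-- the parts A has written when the next index has parity b (b = 'next index is even'):
-- pvMixF grows forward from the front, pvMixB is written backward from the back
def pvMixF (b : Bool) (l : List String) : List String := if b then pvEv2 l else pvEv2 l.tail
def pvMixB (b : Bool) (l : List String) : List String := if b then pvEv2 l.tail else pvEv2 l

lemma pvSet_front {α : Type} (P : List α) (m : Nat) (Q : List α) (v d : α) :
    (P ++ List.replicate (m + 1) d ++ Q).set P.length v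
      = P ++ (v :: List.replicate m d) ++ Q := by
  induction P with
  | nil => simp [List.replicate_succ]
  | cons a P ih => simpa [List.set] using ih

lemma pvSet_back {α : Type} (P : List α) (m : Nat) (Q : List α) (v d : α) :
    (P ++ List.replicate (m + 1) d ++ Q).set (P.length + m) v
      = P ++ List.replicate m d ++ (v :: Q) := by
  induction P with
  | nil =>
    simp only [List.nil_append, List.length_nil, Nat.zero_add]
    induction m with
    | zero => simp [List.replicate_succ]
    | succ k ih => simpa [List.replicate_succ, List.set] using ih
  | cons a P ih => simpa [List.set, Nat.succ_add] using ih

lemma pvLoopA (l : List String) (i : Nat) (P Q : List String) :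
    (PySem.List.enumerate l (i : Int)).foldl pvStepA
        (P.map some ++ List.replicate l.length none ++ Q.map some,
         (P.length : Int), (P.length : Int) + l.length - 1)
      = ((P ++ pvMixF (i % 2 = 0) l ++ (pvMixB (i % 2 = 0) l).reverse ++ Q).map some,
         (P.length : Int) + (pvMixF (i % 2 = 0) l).length,
         (P.length : Int) + l.length - 1 - (pvMixB (i % 2 = 0) l).length) := by
  induction l generalizing i P Q with
  | nil => simp [PySem.List.enumerate_nil, pvMixF, pvMixB, pvEv2]
  | cons c t ih =>
    rw [PySem.List.enumerate_cons]
    by_cases hpar : i % 2 = 0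
    · -- even index: write at the front, start_idx += 1
      have hstep : pvStepA (P.map some ++ List.replicate (c :: t).length none ++ Q.map some,
          (P.length : Int), (P.length : Int) + (c :: t).length - 1) ((i : Int), c)
          = ((P ++ [c]).map some ++ List.replicate t.length none ++ Q.map some,
             ((P ++ [c]).length : Int), ((P ++ [c]).length : Int) + t.length - 1) := by
        have hmod : PySem.Int.mod (i : Int) 2 = 0 := by
          simp [pysem]; omega
        simp only [pvStepA, hmod, if_pos]
        refine Prod.ext ?_ (Prod.ext ?_ ?_)
        · rw [show ((P.length : Int)) = ((P.map some).length : Int) by simp,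
            PySem.List.pySetD_natCast]
          simpa [List.replicate_succ] using
            pvSet_front (P.map some) t.length (Q.map some) (some c) none (P.map some) t.length (Q.map some) (some c) none
        · simp only [List.length_append, List.length_cons, List.length_nil]; push_cast; ring
        · simp only [List.length_append, List.length_cons, List.length_nil]; push_cast; ring
      rw [List.foldl_cons, hstep]
      have hrec := ih (i + 1) (P ++ [c]) Q
      have hpar1 : ¬ ((i + 1) % 2 = 0) := by omega
      rw [show (((i : Nat) + 1 : Nat) : Int) = ((i : Int) + 1) by push_cast; ring] at hrec
      rw [hrec]
      have hF : pvMixF (decide (i % 2 = 0)) (c :: t) = c :: pvMixF (decide ((i+1) % 2 = 0)) t := by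
        simp only [pvMixF, hpar, hpar1]
        cases t <;> simp [pvEv2]
      have hB : pvMixB (decide (i % 2 = 0)) (c :: t) = pvMixB (decide ((i+1) % 2 = 0)) t := by
        simp [pvMixB, hpar, hpar1]
      refine Prod.ext ?_ (Prod.ext ?_ ?_)
      · simp [hF, hB, List.append_assoc]
      · simp [hF]; ring
      · simp [hB]; ring
    · -- odd index: write at the back, end_idx -= 1
      have hstep : pvStepA (P.map some ++ List.replicate (c :: t).length none ++ Q.map some,
          (P.length : Int), (P.length : Int) + (c :: t).length - 1) ((i : Int), c)
          = (P.map some ++ List.replicate t.length none ++ ((c :: Q).map some),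
             (P.length : Int), (P.length : Int) + t.length - 1) := by
        have hmod : ¬ (PySem.Int.mod (i : Int) 2 = 0) := by
          simp [pysem]; omega
        simp only [pvStepA, hmod, if_false]
        refine Prod.ext ?_ (Prod.ext rfl ?_)
        · rw [show ((P.length : Int) + (c :: t).length - 1)
              = (((P.map some).length + t.length : Nat) : Int) by simp; ring,
            PySem.List.pySetD_natCast]
          simpa [List.replicate_succ] using
            pvSet_back (P.map some) t.length (Q.map some) (some c) none
        · simp; ring
      rw [List.foldl_cons, hstep]
      have hrec := ih (i + 1) P (c :: Q)
      have hpar1 : (i + 1) % 2 = 0 := by omega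
      rw [show (((i : Nat) + 1 : Nat) : Int) = ((i : Int) + 1) by push_cast; ring] at hrec
      rw [hrec]
      have hF : pvMixF (decide (i % 2 = 0)) (c :: t) = pvMixF (decide ((i+1) % 2 = 0)) t := by
        simp [pvMixF, hpar, hpar1]
      have hB : pvMixB (decide (i % 2 = 0)) (c :: t)
          = c :: pvMixB (decide ((i+1) % 2 = 0)) t := by
        simp only [pvMixB, hpar, hpar1]
        cases t <;> simp [pvEv2]
      refine Prod.ext ?_ (Prod.ext ?_ ?_)
      · simp [hF, hB, List.append_assoc]
      · simp [hF]
      · simp [hB]; ring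

-- xs[0::2] / xs[1::2] as filterMap over an index range (the shape slice? unfolds to)
lemma pvFm {α : Type} (xs : List α) :
    List.filterMap (fun (k : Nat) => xs[((2 : Int) * (k : Int)).toNat]?)
        (List.range ((xs.length + 1) / 2))
      = pvEv2 xs := by
  induction xs using pvEv2.induct with
  | case1 => simp [pvEv2]
  | case2 a => simp [pvEv2, List.range_succ]
  | case3 a b t ih =>
    have hc : ((a :: b :: t).length + 1) / 2 = (t.length + 1) / 2 + 1 := by simp; omega
    rw [hc, List.range_succ_eq_map, List.filterMap_cons, List.filterMap_map]
    have hf : ((fun (k : Nat) => (a :: b :: t)[((2 : Int) * (k : Int)).toNat]?) ∘ Nat.succ)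
        = fun (k : Nat) => t[((2 : Int) * (k : Int)).toNat]? := by
      funext k
      have h1 : ((2 : Int) * ((k : Int) + 1)).toNat = 2 * k + 2 := by omega
      have h2 : ((2 : Int) * ((k : Nat) : Int)).toNat = 2 * k := by omega
      simp [Function.comp, h1, h2]
    rw [hf, ih]
    simp [pvEv2]

lemma pvSlice0 {α : Type} (xs : List α) :
    PySem.List.slice? xs (some 0) none 2 = some (pvEv2 xs) := by
  simp only [PySem.List.slice?, PySem.List.sliceIndices]
  norm_num
  have hc : (if 0 < xs.length then (((xs.length : Int) + 2 - 1) / 2).toNat else 0)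
      = (xs.length + 1) / 2 := by split <;> omega
  rw [hc]; exact pvFm xs

lemma pvSlice1 {α : Type} (xs : List α) :
    PySem.List.slice? xs (some 1) none 2 = some (pvEv2 xs.tail) := by
  cases xs with
  | nil => rfl
  | cons a t =>
    simp only [PySem.List.slice?, PySem.List.sliceIndices]
    norm_num
    have hc : (if 0 < t.length then (((t.length : Int) + 2 - 1) / 2).toNat else 0)
        = (t.length + 1) / 2 := by split <;> omega
    rw [hc]
    have hf : (fun (x : Nat) => (a :: t)[((1 : Int) + 2 * (x : Int)).toNat]?)
        = fun (k : Nat) => t[((2 : Int) * (k : Int)).toNat]? := by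
      funext k
      have h1 : ((1 : Int) + 2 * (k : Int)).toNat = 2 * k + 1 := by omega
      have h2 : ((2 : Int) * ((k : Nat) : Int)).toNat = 2 * k := by omega
      rw [h1, h2]
      simp
    rw [hf]
    exact pvFm t

lemma pvReduceMapSome {α : Type} (l : List α) : (l.map some).reduceOption = l := by
  induction l with
  | nil => rfl
  | cons a t ih => simp [List.reduceOption_cons_of_some, ih]

-- ===== VERDICT (by name: the statement is the Claim_ definition above) =====
theorem reorder_for_lost_in_the_middle_py_spec : Claim_equal_reorder_for_lost_in_the_middle_py := by
  intro chunks _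
  unfold Spec_reorder_for_lost_in_the_middle_py
  unfold reorder_for_lost_in_the_middle_py reorder_for_lost_in_the_middle_py_alt
  by_cases h : chunks.length ≤ 2
  · simp [h]
  · simp only [h, if_false]
    have hmain := pvLoopA chunks 0 [] []
    norm_num at hmain
    have h1 := congrArg Prod.fst hmain
    simp only at h1
    rw [h1, pvSlice0, pvSlice1, PySem.List.slice?_none_none_neg_one]
    simp [pvMixF, pvMixB, List.reduceOption_append, ← List.map_reverse, pvReduceMapSome]
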